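-- pv_equiv track=rewrite | github.com/anbaoxu1/STQA_Project | bert_train_test_template.py | restore_keywords_from_tokens
-- ===== SOURCE A (Python) =====
-- def restore_keywords_from_tokens(tokens, token_slot):
--     keywords = []
--     current_tokens = []
--     current_label = None
--     token_slot = token_slot[1:-1]
--
--     for token, slot in zip(tokens, token_slot):
--         if slot.startswith('B-'):
--             if current_tokens:
--                 keywords.append((''.join(current_tokens), current_label))
--                 current_tokens = []
--             current_label = slot[2:]
--             current_tokens.append(token)
--         elif slot.startswith('I-') and current_label == slot[2:]:
--             current_tokens.append(token)
--         else:
--             if current_tokens: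
--                 keywords.append((''.join(current_tokens), current_label))
--                 current_tokens = []
--                 current_label = None
--
--     if current_tokens:
--         keywords.append((''.join(current_tokens), current_label))
--
--     return keywords
-- ===== SOURCE B (Python) =====
-- def restore_keywords_from_tokens(tokens, token_slot):
--     aligned = list(zip(tokens, token_slot[1:-1]))
--     n = len(aligned)
--     keywords = []
--     i = 0
--     while i < n:
--         token, slot = aligned[i]
--         if slot.startswith('B-'):
--             label = slot[2:]
--             parts = [token]
--             j = i + 1
--             while j < n and aligned[j][1].startswith('I-') and aligned[j][1][2:] == label:
--                 parts.append(aligned[j][0])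
--                 j += 1
--             keywords.append((''.join(parts), label))
--             i = j
--         else:
--             i += 1
--     return keywords
-- ===== Notes on version B (the rewrite author's own statement) =====
-- stated objective: alternative
-- what changed: Replaces A's flat pass with mutable current_tokens/current_label accumulator state (and a trailing flush) by a nested scan over the aligned (token, slot) list that, at each 'B-' slot, consumes the following matching 'I-' slots with an inner while-loop and emits the keyword span directly.
import Mathlib
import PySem

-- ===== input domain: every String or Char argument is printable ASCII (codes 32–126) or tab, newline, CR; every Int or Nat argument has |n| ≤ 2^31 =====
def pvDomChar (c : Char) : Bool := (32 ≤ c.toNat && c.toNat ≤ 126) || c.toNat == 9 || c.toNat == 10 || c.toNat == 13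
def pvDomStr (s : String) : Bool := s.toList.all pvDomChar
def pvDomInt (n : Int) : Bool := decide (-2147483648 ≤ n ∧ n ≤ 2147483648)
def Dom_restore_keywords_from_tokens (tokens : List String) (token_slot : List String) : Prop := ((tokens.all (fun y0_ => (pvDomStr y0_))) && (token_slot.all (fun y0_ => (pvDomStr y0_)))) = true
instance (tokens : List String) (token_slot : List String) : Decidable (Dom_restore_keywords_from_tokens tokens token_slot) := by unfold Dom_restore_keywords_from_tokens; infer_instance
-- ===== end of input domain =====

-- B replaces A's flat pass with mutable current_tokens/current_label state by a nested scan
-- that emits each 'B-…' span directly via an inner while-loop (objective: alternative decomposition).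

-- ===== PORT A =====
-- A's for-loop over zip(tokens, token_slot[1:-1]) with state (keywords, current_tokens, current_label).
-- current_label : Option String; '.getD ""' is only evaluated when current_tokens ≠ [], where A's loop
-- invariant guarantees current_label is `some _` (a B- slot was seen), so the default is never used.
def restoreA_loop (pairs : List (String × String)) (keywords : List (String × String))
    (cur : List String) (lbl : Option String) : List (String × String) :=
  match pairs with
  | [] => if cur ≠ [] then keywords ++ [(PySem.Str.join "" cur, lbl.getD "")] else keywords
  | (token, slot) :: rest =>
    if PySem.Str.startswith slot "B-" = true then
      restoreA_loop rest
        (if cur ≠ [] then keywords ++ [(PySem.Str.join "" cur, lbl.getD "")] else keywords)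
        [token] (some (PySem.Str.slice slot (some 2) none))
    else if PySem.Str.startswith slot "I-" = true ∧ lbl = some (PySem.Str.slice slot (some 2) none) then
      restoreA_loop rest keywords (cur ++ [token]) lbl
    else
      if cur ≠ [] then restoreA_loop rest (keywords ++ [(PySem.Str.join "" cur, lbl.getD "")]) [] none
      else restoreA_loop rest keywords cur lbl

def restore_keywords_from_tokens (tokens : List String) (token_slot : List String) : List (String × String) :=
  restoreA_loop (tokens.zip (PySem.List.slice token_slot (some 1) (some (-1)))) [] [] none

-- ===== PORT B =====
-- Inner while-loop of Source B: collect tokens while the slot is 'I-<label>'; returns (collected, remainder).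
def restoreB_takeI (label : String) (pairs : List (String × String)) :
    List String × List (String × String) :=
  match pairs with
  | [] => ([], [])
  | (t, s) :: rest =>
    if PySem.Str.startswith s "I-" = true ∧ PySem.Str.slice s (some 2) none = label then
      let (c, r) := restoreB_takeI label rest
      (t :: c, r)
    else ([], (t, s) :: rest)

theorem restoreB_takeI_len (label : String) (pairs : List (String × String)) :
    (restoreB_takeI label pairs).2.length ≤ pairs.length := by
  induction pairs with
  | nil => simp [restoreB_takeI]
  | cons hd rest ih =>
    obtain ⟨t, s⟩ := hd
    simp only [restoreB_takeI]
    split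
    · exact le_trans ih (by simp)
    · simp

-- Outer while-loop of Source B over the aligned list.
def restoreB_go (pairs : List (String × String)) : List (String × String) :=
  match pairs with
  | [] => []
  | (t, s) :: rest =>
    if PySem.Str.startswith s "B-" = true then
      let label := PySem.Str.slice s (some 2) none
      let pr := restoreB_takeI label rest
      (PySem.Str.join "" (t :: pr.1), label) :: restoreB_go pr.2
    else restoreB_go rest
termination_by pairs.length
decreasing_by
  · exact Nat.lt_succ_of_le (restoreB_takeI_len _ rest)
  · simp

def restore_keywords_from_tokens_alt (tokens : List String) (token_slot : List String) : List (String × String) :=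
  restoreB_go (tokens.zip (PySem.List.slice token_slot (some 1) (some (-1))))

-- ===== PRECONDITION & SPEC =====
def Spec_restore_keywords_from_tokens (tokens : List String) (token_slot : List String) (out : List (String × String)) : Prop := out = restore_keywords_from_tokens_alt tokens token_slot
instance (tokens : List String) (token_slot : List String) (out : List (String × String)) : Decidable (Spec_restore_keywords_from_tokens tokens token_slot out) := by unfold Spec_restore_keywords_from_tokens; infer_instance

-- ===== CLAIM (what is proved, stated in full; the proofs are below) =====
def Claim_equal_restore_keywords_from_tokens : Prop := ∀ (tokens : List String) (token_slot : List String), Dom_restore_keywords_from_tokens tokens token_slot → Spec_restore_keywords_from_tokens tokens token_slot (restore_keywords_from_tokens tokens token_slot)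

-- ===== LEMMAS AND PROOFS =====

-- A string cannot start with both "B-" and "I-".
theorem not_B_and_I (s : String) (hB : PySem.Str.startswith s "B-" = true)
    (hI : PySem.Str.startswith s "I-" = true) : False := by
  rw [PySem.Str.startswith_eq, PySem.Chars.startswith_iff] at hB hI
  obtain ⟨u, hu⟩ := hB
  obtain ⟨v, hv⟩ := hI
  rw [← hu] at hv
  simp at hv

-- Loop invariant: A's flat pass equals B's nested scan, both in the idle state
-- (cur = [], lbl = none) and inside a span (cur ≠ [], lbl = some lbl0).
theorem restore_main (l : List (String × String)) :
    (∀ kws, restoreA_loop l kws [] none = kws ++ restoreB_go l) ∧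
    (∀ kws cur lbl0, cur ≠ [] →
      restoreA_loop l kws cur (some lbl0) =
        kws ++ (PySem.Str.join "" (cur ++ (restoreB_takeI lbl0 l).1), lbl0)
          :: restoreB_go (restoreB_takeI lbl0 l).2) := by
  induction l with
  | nil =>
    constructor
    · intro kws; simp [restoreA_loop, restoreB_go]
    · intro kws cur lbl0 hcur
      simp [restoreA_loop, restoreB_takeI, restoreB_go, hcur]
  | cons hd r ih =>
    obtain ⟨t, s⟩ := hd
    constructor
    · intro kws
      by_cases hB : PySem.Str.startswith s "B-" = true
      · have stepA : restoreA_loop ((t, s) :: r) kws [] none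
            = restoreA_loop r kws [t] (some (PySem.Str.slice s (some 2) none)) := by
          simp only [restoreA_loop]
          rw [if_pos hB, if_neg (by simp : ¬(([] : List String) ≠ []))]
        have stepB : restoreB_go ((t, s) :: r)
            = (PySem.Str.join "" (t :: (restoreB_takeI (PySem.Str.slice s (some 2) none) r).1),
                PySem.Str.slice s (some 2) none)
              :: restoreB_go (restoreB_takeI (PySem.Str.slice s (some 2) none) r).2 := by
          simp only [restoreB_go]
          rw [if_pos hB]
        rw [stepA, ih.2 kws [t] _ (by simp), stepB]
        simp
      · have h2 : ¬(PySem.Str.startswith s "I-" = true ∧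
            (none : Option String) = some (PySem.Str.slice s (some 2) none)) := by
          rintro ⟨-, h⟩; simp at h
        have stepA : restoreA_loop ((t, s) :: r) kws [] none = restoreA_loop r kws [] none := by
          simp only [restoreA_loop]
          rw [if_neg hB, if_neg h2, if_neg (by simp : ¬(([] : List String) ≠ []))]
        have stepB : restoreB_go ((t, s) :: r) = restoreB_go r := by
          simp only [restoreB_go]; rw [if_neg hB]
        rw [stepA, ih.1 kws, stepB]
    · intro kws cur lbl0 hcur
      by_cases hB : PySem.Str.startswith s "B-" = true
      · have stepA : restoreA_loop ((t, s) :: r) kws cur (some lbl0)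
            = restoreA_loop r (kws ++ [(PySem.Str.join "" cur, lbl0)]) [t]
                (some (PySem.Str.slice s (some 2) none)) := by
          simp only [restoreA_loop]
          rw [if_pos hB, if_pos hcur]
          rfl
        have hTI : restoreB_takeI lbl0 ((t, s) :: r) = ([], (t, s) :: r) := by
          simp only [restoreB_takeI]
          rw [if_neg (fun h => not_B_and_I s hB h.1)]
        have stepB : restoreB_go ((t, s) :: r)
            = (PySem.Str.join "" (t :: (restoreB_takeI (PySem.Str.slice s (some 2) none) r).1),
                PySem.Str.slice s (some 2) none)
              :: restoreB_go (restoreB_takeI (PySem.Str.slice s (some 2) none) r).2 := by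
          simp only [restoreB_go]
          rw [if_pos hB]
        rw [stepA, ih.2 _ [t] _ (by simp), hTI]
        simp [stepB]
      · by_cases hI : PySem.Str.startswith s "I-" = true
        · by_cases hEq : lbl0 = PySem.Str.slice s (some 2) none
          · have stepA : restoreA_loop ((t, s) :: r) kws cur (some lbl0)
                = restoreA_loop r kws (cur ++ [t]) (some lbl0) := by
              simp only [restoreA_loop]
              rw [if_neg hB, if_pos ⟨hI, by rw [hEq]⟩]
            have hTI : restoreB_takeI lbl0 ((t, s) :: r)
                = (t :: (restoreB_takeI lbl0 r).1, (restoreB_takeI lbl0 r).2) := by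
              simp only [restoreB_takeI]
              rw [if_pos ⟨hI, hEq.symm⟩]
            rw [stepA, ih.2 kws (cur ++ [t]) lbl0 (by simp), hTI]
            simp
          · have h2 : ¬(PySem.Str.startswith s "I-" = true ∧
                (some lbl0 : Option String) = some (PySem.Str.slice s (some 2) none)) := by
              rintro ⟨-, h⟩; exact hEq (Option.some.inj h)
            have stepA : restoreA_loop ((t, s) :: r) kws cur (some lbl0)
                = restoreA_loop r (kws ++ [(PySem.Str.join "" cur, lbl0)]) [] none := by
              simp only [restoreA_loop]
              rw [if_neg hB, if_neg h2, if_pos hcur]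
              rfl
            have hTI : restoreB_takeI lbl0 ((t, s) :: r) = ([], (t, s) :: r) := by
              simp only [restoreB_takeI]
              rw [if_neg (fun h => hEq h.2.symm)]
            have stepB : restoreB_go ((t, s) :: r) = restoreB_go r := by
              simp only [restoreB_go]; rw [if_neg hB]
            rw [stepA, ih.1 _, hTI, stepB]
            simp
        · have h2 : ¬(PySem.Str.startswith s "I-" = true ∧
              (some lbl0 : Option String) = some (PySem.Str.slice s (some 2) none)) := by
            rintro ⟨h, -⟩; exact hI h
          have stepA : restoreA_loop ((t, s) :: r) kws cur (some lbl0)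
              = restoreA_loop r (kws ++ [(PySem.Str.join "" cur, lbl0)]) [] none := by
            simp only [restoreA_loop]
            rw [if_neg hB, if_neg h2, if_pos hcur]
            rfl
          have hTI : restoreB_takeI lbl0 ((t, s) :: r) = ([], (t, s) :: r) := by
            simp only [restoreB_takeI]
            rw [if_neg (fun h => hI h.1)]
          have stepB : restoreB_go ((t, s) :: r) = restoreB_go r := by
            simp only [restoreB_go]; rw [if_neg hB]
          rw [stepA, ih.1 _, hTI, stepB]
          simp

-- ===== VERDICT (by name: the statement is the Claim_ definition above) =====
theorem restore_keywords_from_tokens_spec : Claim_equal_restore_keywords_from_tokens := by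
  intro tokens token_slot _
  unfold Spec_restore_keywords_from_tokens restore_keywords_from_tokens restore_keywords_from_tokens_alt
  exact (restore_main _).1 []
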